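-- pv_equiv track=rewrite | github.com/Alexey-shishkin4/minis-python | 1.py | bits_in_negative
-- ===== SOURCE A (Python) =====
-- def bits_in_negative(num):  # -123 = ...110000101
--     num = abs(num)
--     c = 0
--     good_one = True
--     while num:
--         if num % 2:
--             good_one = False
--         if not num % 2 and not good_one:
--             c += 1
--         num >>= 1
--     c += 2
--     return c
-- ===== SOURCE B (Python) =====
-- def bits_in_negative(num):
--     s = bin(abs(num))[2:].rstrip('0')
--     return s.count('0') + 2
-- ===== Notes on version B (the rewrite author's own statement) =====
-- stated objective: simpler
-- what changed: Replaces the LSB-to-MSB arithmetic bit loop with state flags by a binary string representation: strip the trailing zeros (below the lowest set bit) and count the remaining '0' characters.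
import Mathlib
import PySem

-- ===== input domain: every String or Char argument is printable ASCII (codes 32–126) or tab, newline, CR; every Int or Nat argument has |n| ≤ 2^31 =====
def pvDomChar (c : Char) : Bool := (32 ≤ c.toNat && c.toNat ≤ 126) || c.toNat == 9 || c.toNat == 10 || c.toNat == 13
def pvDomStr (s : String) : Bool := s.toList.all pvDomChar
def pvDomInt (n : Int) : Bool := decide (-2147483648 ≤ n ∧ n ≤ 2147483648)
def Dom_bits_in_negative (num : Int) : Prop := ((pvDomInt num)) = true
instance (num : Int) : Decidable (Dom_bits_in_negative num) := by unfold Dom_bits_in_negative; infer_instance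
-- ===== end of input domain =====

-- B replaces A's arithmetic LSB-to-MSB bit loop (with a 'seen a one yet' flag) by the
-- binary string of |num|: strip trailing zeros, count the remaining zero characters (objective: simpler).

-- ===== PORT A =====
-- the while loop: state (num, c, good_one), iterating num >>= 1
def bitsLoopA (n c : Nat) (good : Bool) : Nat :=
  if n = 0 then c
  else
    let good' := if n % 2 = 1 then false else good
    let c' := if n % 2 = 0 ∧ good' = false then c + 1 else c
    bitsLoopA (n / 2) c' good'
termination_by n
decreasing_by exact Nat.div_lt_self (Nat.pos_of_ne_zero (by assumption)) (by norm_num)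

def bits_in_negative (num : Int) : Int :=
  ((bitsLoopA num.natAbs 0 true : Nat) : Int) + 2

-- ===== PORT B =====
-- bin(n)[2:] as a list of bits, most significant first (for n = 0 Python gives "0")
def binStr (n : Nat) : List Bool :=
  if n = 0 then [false]
  else if n / 2 = 0 then [n % 2 == 1]
  else binStr (n / 2) ++ [n % 2 == 1]
termination_by n
decreasing_by exact Nat.div_lt_self (Nat.pos_of_ne_zero (by assumption)) (by norm_num)

-- s.rstrip('0'): drop trailing false bits
def rstrip0 (l : List Bool) : List Bool := (l.reverse.dropWhile (fun b => !b)).reverse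

def bits_in_negative_alt (num : Int) : Int :=
  (((rstrip0 (binStr num.natAbs)).count false : Nat) : Int) + 2

-- ===== PRECONDITION & SPEC =====
def Spec_bits_in_negative (num : Int) (out : Int) : Prop := out = bits_in_negative_alt num
instance (num : Int) (out : Int) : Decidable (Spec_bits_in_negative num out) := by unfold Spec_bits_in_negative; infer_instance

-- ===== CLAIM (what is proved, stated in full; the proofs are below) =====
def Claim_equal_bits_in_negative : Prop := ∀ (num : Int), Dom_bits_in_negative num → Spec_bits_in_negative num (bits_in_negative num)

-- ===== LEMMAS AND PROOFS =====

-- LSB-first bit list of n (the reverse of binStr up to the n = 0 representation)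
def bitsLSB (n : Nat) : List Bool :=
  if n = 0 then [] else (n % 2 == 1) :: bitsLSB (n / 2)
termination_by n
decreasing_by exact Nat.div_lt_self (Nat.pos_of_ne_zero (by assumption)) (by norm_num)

theorem binStr_reverse (n : Nat) (h : n ≠ 0) : (binStr n).reverse = bitsLSB n := by
  induction n using Nat.strong_induction_on with
  | _ n ih =>
    rw [binStr, bitsLSB]
    simp only [h]
    by_cases h2 : n / 2 = 0
    · simp [h2, bitsLSB]
    · rw [if_neg h2]
      simp [ih (n / 2) (Nat.div_lt_self (Nat.pos_of_ne_zero h) (by norm_num)) h2]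

theorem bitsLoopA_eq (n : Nat) : ∀ c : Nat,
    (bitsLoopA n c false = c + (bitsLSB n).count false) ∧
    (bitsLoopA n c true = c + ((bitsLSB n).dropWhile (fun b => !b)).count false) := by
  induction n using Nat.strong_induction_on with
  | _ n ih =>
    intro c
    by_cases h : n = 0
    · subst h; constructor <;> simp [bitsLoopA, bitsLSB]
    · have hlt := Nat.div_lt_self (Nat.pos_of_ne_zero h) (show 1 < 2 by norm_num)
      have hmod : n % 2 = 0 ∨ n % 2 = 1 := Nat.mod_two_eq_zero_or_one n
      rw [bitsLSB, if_neg h]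
      rcases hmod with hm | hm
      · constructor
        · rw [bitsLoopA, if_neg h]
          simp only [hm]
          norm_num
          rw [(ih (n / 2) hlt (c + 1)).1]
          simp only [List.count_cons]
          norm_num
          omega
        · rw [bitsLoopA, if_neg h]
          simp only [hm]
          norm_num
          exact (ih (n / 2) hlt c).2
      · constructor
        · rw [bitsLoopA, if_neg h]
          simp only [hm]
          norm_num
          exact (ih (n / 2) hlt c).1
        · rw [bitsLoopA, if_neg h]
          simp only [hm]
          norm_num
          exact (ih (n / 2) hlt c).1

-- ===== VERDICT (by name: the statement is the Claim_ definition above) =====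
theorem bits_in_negative_spec : Claim_equal_bits_in_negative := by
  intro num _
  unfold Spec_bits_in_negative bits_in_negative bits_in_negative_alt rstrip0
  congr 1
  norm_cast
  rw [(bitsLoopA_eq num.natAbs 0).2]
  by_cases h : num.natAbs = 0
  · simp [h, bitsLSB, binStr, List.dropWhile]
  · rw [binStr_reverse _ h, List.count_reverse]
    omega
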